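-- pv_equiv track=rewrite | github.com/fikreanteneh/competitive-programming | 1769-minimum-number-of-operations-to-move-all-balls-to-each-box/1769-minimum-number-of-operations-to-move-all-balls-to-each-box.py | count
-- ===== SOURCE A (Python) =====
-- def count(boxes, star, end, sign):
--     new = [0]
--     flag = 0
--     for i in range(star, end, sign):
--         new.append(new[-1] + flag)
--         if boxes[i] == "1":
--             flag += 1
--     return new
-- ===== SOURCE B (Python) =====
-- def count(boxes, star, end, sign):
--     # closed form: the cost after t+1 steps is t*c - s, where c is the number of
--     # '1' boxes among the first t+1 visited steps and s the sum of their step numbers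
--     visited = [boxes[i] for i in range(star, end, sign)]
--     out = [0]
--     c = 0
--     s = 0
--     for t, ch in enumerate(visited):
--         if ch == "1":
--             c += 1
--             s += t
--         out.append(t * c - s)
--     return out
-- ===== Notes on version B (the rewrite author's own statement) =====
-- stated objective: alternative
-- what changed: A accumulates the running cost by reading new[-1] and adding a running flag each step; B computes each entry directly from the closed form t*c - s, maintaining only the count c of ones seen and the sum s of their step indices over the enumerated visited characters.
import Mathlib
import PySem

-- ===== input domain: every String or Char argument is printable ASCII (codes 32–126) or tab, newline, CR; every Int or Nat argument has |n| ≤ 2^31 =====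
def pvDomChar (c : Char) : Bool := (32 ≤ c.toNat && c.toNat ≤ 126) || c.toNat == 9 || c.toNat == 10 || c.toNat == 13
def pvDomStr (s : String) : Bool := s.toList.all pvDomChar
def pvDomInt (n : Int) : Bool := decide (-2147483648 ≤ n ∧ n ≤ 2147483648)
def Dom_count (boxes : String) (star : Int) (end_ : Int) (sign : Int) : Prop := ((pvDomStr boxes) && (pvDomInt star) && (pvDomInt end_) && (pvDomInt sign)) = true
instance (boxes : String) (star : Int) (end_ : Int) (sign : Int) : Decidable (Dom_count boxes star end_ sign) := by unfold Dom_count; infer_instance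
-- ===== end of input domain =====

-- B replaces A's fused running-sum accumulator with the closed form t*c - s over (count, index-sum) of the ones; same values.

-- ===== PORT A =====
-- A's single loop: new.append(new[-1] + flag); then maybe flag += 1.  State = (new, flag).
def count (boxes : String) (star : Int) (end_ : Int) (sign : Int) : List Int :=
  ((PySem.List.pyRange star end_ sign).foldl
    (fun (st : List Int × Int) i =>
      (st.1 ++ [(PySem.List.pyGet? st.1 (-1)).getD 0 + st.2],
       if PySem.Str.pyGet? boxes i == some '1' then st.2 + 1 else st.2))
    ([0], 0)).1

-- ===== PORT B =====
-- B: extract the visited characters, then enumerate them maintaining (c, s) = (ones count, sum of their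
-- step numbers) and append the closed-form value t*c - s after each step.
def count_alt (boxes : String) (star : Int) (end_ : Int) (sign : Int) : List Int :=
  let visited := (PySem.List.pyRange star end_ sign).map (fun i => (PySem.Str.pyGet? boxes i).getD ' ')
  ((PySem.List.enumerate visited 0).foldl
    (fun (st : List Int × Int × Int) p =>
      let cs := if p.2 == '1' then (st.2.1 + 1, st.2.2 + p.1) else st.2
      (st.1 ++ [p.1 * cs.1 - cs.2], cs))
    ([0], 0, 0)).1

-- ===== PRECONDITION & SPEC =====
-- Pre_ excludes exactly the inputs where the Python A raises: sign = 0 (range ValueError)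
-- and any visited index i outside [-len(boxes), len(boxes)) (IndexError).
def Pre_count (boxes : String) (star : Int) (end_ : Int) (sign : Int) : Prop :=
  sign ≠ 0 ∧
    (let n : Int := (boxes.toList.length : Int)
     let k : Int := -(PySem.Int.floordiv (star - end_) sign)
     let last : Int := star + sign * (k - 1)
     k ≤ 0 ∨ (-n ≤ min star last ∧ max star last < n))
instance (boxes : String) (star : Int) (end_ : Int) (sign : Int) : Decidable (Pre_count boxes star end_ sign) := by unfold Pre_count; infer_instance

def pvWitness_count : String × Int × Int × Int := ("0110", 0, 4, 1)

def Spec_count (boxes : String) (star : Int) (end_ : Int) (sign : Int) (out : List Int) : Prop := out = count_alt boxes star end_ sign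
instance (boxes : String) (star : Int) (end_ : Int) (sign : Int) (out : List Int) : Decidable (Spec_count boxes star end_ sign out) := by unfold Spec_count; infer_instance

-- ===== CLAIM (what is proved, stated in full; the proofs are below) =====
def Claim_equal_count : Prop := ∀ (boxes : String) (star : Int) (end_ : Int) (sign : Int), Dom_count boxes star end_ sign → Pre_count boxes star end_ sign → Spec_count boxes star end_ sign (count boxes star end_ sign)

-- ===== LEMMAS AND PROOFS =====

-- abbreviations for the two loop bodies, used only in the proofs below
def pvStepA (boxes : String) (st : List Int × Int) (i : Int) : List Int × Int :=
  (st.1 ++ [(PySem.List.pyGet? st.1 (-1)).getD 0 + st.2],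
   if PySem.Str.pyGet? boxes i == some '1' then st.2 + 1 else st.2)

def pvStepB (st : List Int × Int × Int) (p : Int × Char) : List Int × Int × Int :=
  let cs := if p.2 == '1' then (st.2.1 + 1, st.2.2 + p.1) else st.2
  (st.1 ++ [p.1 * cs.1 - cs.2], cs)

-- A's condition on the raw option equals B's condition on the defaulted character
lemma pvCond_eq (o : Option Char) : (o == some '1') = (o.getD ' ' == '1') := by
  cases o <;> simp

-- A's loop only reads new through new[-1], so a prefix of the list passes through untouched
lemma afold_shift (boxes : String) (l : List Int) :
    ∀ (o r : List Int) (flag : Int), r ≠ [] →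
      l.foldl (pvStepA boxes) (o ++ r, flag) =
        (o ++ (l.foldl (pvStepA boxes) (r, flag)).1, (l.foldl (pvStepA boxes) (r, flag)).2) := by
  induction l with
  | nil => intro o r flag hr; simp
  | cons i l ih =>
    intro o r flag hr
    have hget : PySem.List.pyGet? (o ++ r) (-1) = PySem.List.pyGet? r (-1) := by
      rw [PySem.List.pyGet?_neg_one, PySem.List.pyGet?_neg_one,
          List.getLast?_append_of_ne_nil o hr]
    simp only [List.foldl_cons, pvStepA, hget, List.append_assoc]
    exact ih o _ _ (by simp)

-- B's loop only appends to out
lemma bfold_shift (l : List (Int × Char)) :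
    ∀ (o : List Int) (q : Int × Int),
      l.foldl pvStepB (o, q) =
        (o ++ (l.foldl pvStepB ([], q)).1, (l.foldl pvStepB ([], q)).2) := by
  induction l with
  | nil => intro o q; simp
  | cons p l ih =>
    intro o q
    simp only [List.foldl_cons, pvStepB]
    rw [ih (o ++ _), ih ([] ++ _)]
    simp

-- fst-forms of the shift lemmas
lemma afold_shift_fst (boxes : String) (l : List Int) (o r : List Int) (flag : Int) (hr : r ≠ []) :
    (l.foldl (pvStepA boxes) (o ++ r, flag)).1 = o ++ (l.foldl (pvStepA boxes) (r, flag)).1 := by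
  rw [afold_shift boxes l o r flag hr]

lemma bfold_shift_fst (l : List (Int × Char)) (o : List Int) (q : Int × Int) :
    (l.foldl pvStepB (o, q)).1 = o ++ (l.foldl pvStepB ([], q)).1 := by
  rw [bfold_shift l o q]

-- invariant: A's fused accumulator run equals B's closed-form run, for any step offset t
-- and any (c, s) with A's last value = (t-1)*c - s and flag = c
lemma main_inv (boxes : String) (l : List Int) :
    ∀ (t c s : Int),
      (l.foldl (pvStepA boxes) ([(t - 1) * c - s], c)).1 =
        ((PySem.List.enumerate (l.map (fun i => (PySem.Str.pyGet? boxes i).getD ' ')) t).foldl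
          pvStepB ([(t - 1) * c - s], c, s)).1 := by
  induction l with
  | nil => intro t c s; simp [PySem.List.enumerate_nil]
  | cons i l ih =>
    intro t c s
    simp only [List.map_cons, PySem.List.enumerate_cons, List.foldl_cons, pvStepA, pvStepB,
      PySem.List.pyGet?_neg_one, List.getLast?_singleton, Option.getD_some,
      pvCond_eq (PySem.Str.pyGet? boxes i)]
    by_cases h : ((PySem.Str.pyGet? boxes i).getD ' ' == '1') = true
    · simp only [h, if_pos]
      have e1 : (t - 1) * c - s + c = t * c - s := by ring
      have e2 : t * (c + 1) - (s + t) = t * c - s := by ring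
      have e3 : (t + 1 - 1) * (c + 1) - (s + t) = t * c - s := by ring
      rw [afold_shift_fst boxes l [(t - 1) * c - s] _ _ (by simp), bfold_shift_fst]
      have hi := ih (t + 1) (c + 1) (s + t)
      rw [e3, bfold_shift_fst] at hi
      simp [e1, e2, hi]
    · simp only [h, if_neg, Bool.false_eq_true, not_false_iff]
      have e1 : (t - 1) * c - s + c = t * c - s := by ring
      have e3 : (t + 1 - 1) * c - s = t * c - s := by ring
      rw [afold_shift_fst boxes l [(t - 1) * c - s] _ _ (by simp), bfold_shift_fst]
      have hi := ih (t + 1) c s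
      rw [e3, bfold_shift_fst] at hi
      simp [e1, hi]

-- ===== VERDICT (by name: the statement is the Claim_ definition above) =====
theorem count_spec : Claim_equal_count := by
  intro boxes star end_ sign _ _
  show count boxes star end_ sign = count_alt boxes star end_ sign
  show ((PySem.List.pyRange star end_ sign).foldl (pvStepA boxes) ([0], 0)).1 =
    ((PySem.List.enumerate
        ((PySem.List.pyRange star end_ sign).map (fun i => (PySem.Str.pyGet? boxes i).getD ' ')) 0).foldl
      pvStepB ([0], 0, 0)).1
  have := main_inv boxes (PySem.List.pyRange star end_ sign) 0 0 0
  norm_num at this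
  exact this
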